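-- pv_equiv track=rewrite | github.com/Samolukova/p | run.py | parse
-- ===== SOURCE A (Python) =====
-- def parse(lines):
--     depth = len(lines) - 2
--     rooms = []
--     for i in range(4):
--         col = []
--         for j in range(2, 2 + depth):
--             col.append(lines[j][3 + 2*i])
--         rooms.append(tuple(col))
--     return ("." * 11, tuple(rooms))
-- ===== SOURCE B (Python) =====
-- def parse(lines):
--     depth = len(lines) - 2
--     if depth <= 0:
--         return ("." * 11, ((), (), (), ()))
--     rows = [(lines[j][3], lines[j][5], lines[j][7], lines[j][9])
--             for j in range(2, 2 + depth)]
--     return ("." * 11, tuple(zip(*rows)))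
-- ===== Notes on version B (the rewrite author's own statement) =====
-- stated objective: idiomatic
-- what changed: A builds each room column with a nested loop indexing lines[j][3+2*i]; B builds the grid row-by-row (one 4-tuple per line) and transposes with zip(*rows), guarding the empty-grid case.
import Mathlib
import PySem

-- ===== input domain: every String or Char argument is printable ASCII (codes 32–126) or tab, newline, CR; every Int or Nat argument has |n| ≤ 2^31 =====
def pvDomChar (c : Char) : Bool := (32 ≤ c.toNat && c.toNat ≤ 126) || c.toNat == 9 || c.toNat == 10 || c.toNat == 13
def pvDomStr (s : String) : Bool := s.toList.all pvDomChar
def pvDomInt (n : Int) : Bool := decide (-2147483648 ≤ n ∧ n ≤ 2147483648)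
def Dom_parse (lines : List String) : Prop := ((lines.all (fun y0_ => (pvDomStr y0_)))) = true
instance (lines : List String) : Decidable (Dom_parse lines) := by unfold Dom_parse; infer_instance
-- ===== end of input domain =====

-- ===== PORT A =====
-- B restructures A's column-by-column double loop as rows-then-transpose; objective: idiomatic decomposition (same cost).
-- Both ports read lines[j][k] through this shared helper; "" is returned only outside Pre_parse (where Python raises IndexError).
def lineChar (lines : List String) (j k : Int) : String :=
  (((PySem.List.pyGet? lines j).bind (fun s => PySem.Str.pyGet? s k)).map Char.toString).getD ""

def parse (lines : List String) : String × List (List String) :=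
  let depth : Int := (lines.length : Int) - 2
  let rooms : List (List String) :=
    (PySem.List.pyRange 0 4 1).foldl (fun rooms i =>
      let col : List String :=
        (PySem.List.pyRange 2 (2 + depth) 1).foldl (fun col j =>
          col ++ [lineChar lines j (3 + 2 * i)]) []
      rooms ++ [col]) []
  ("...........", rooms)

-- ===== PORT B =====
-- zip(*rows) for rows of 4-tuples, ported by hand as a structural 4-way unzip (exact on that shape).
def unzip4 (rows : List (String × String × String × String)) :
    List String × List String × List String × List String :=
  match rows with
  | [] => ([], [], [], [])
  | (a, b, c, d) :: rs =>
    let (as_, bs, cs, ds) := unzip4 rs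
    (a :: as_, b :: bs, c :: cs, d :: ds)

def parse_alt (lines : List String) : String × List (List String) :=
  let depth : Int := (lines.length : Int) - 2
  if depth ≤ 0 then ("...........", [[], [], [], []])
  else
    let rows : List (String × String × String × String) :=
      (PySem.List.pyRange 2 (2 + depth) 1).map (fun j =>
        (lineChar lines j 3, lineChar lines j 5, lineChar lines j 7, lineChar lines j 9))
    let z := unzip4 rows
    ("...........", [z.1, z.2.1, z.2.2.1, z.2.2.2])

-- ===== PRECONDITION & SPEC =====
-- Pre_parse excludes exactly the inputs where Python A raises IndexError: some line after the
-- first two shorter than 10 characters (A reads columns 3,5,7,9 of every such line).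
def Pre_parse (lines : List String) : Prop :=
  ∀ s ∈ lines.drop 2, 10 ≤ s.toList.length
instance (lines : List String) : Decidable (Pre_parse lines) := by unfold Pre_parse; infer_instance
def pvWitness_parse : List String := ["x", "y", "#.A.B.C.D.#", "#.a.b.c.d.#"]
def Spec_parse (lines : List String) (out : String × List (List String)) : Prop := out = parse_alt lines
instance (lines : List String) (out : String × List (List String)) : Decidable (Spec_parse lines out) := by unfold Spec_parse; infer_instance

-- ===== CLAIM (what is proved, stated in full; the proofs are below) =====
def Claim_equal_parse : Prop := ∀ (lines : List String), Dom_parse lines → Pre_parse lines → Spec_parse lines (parse lines)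

-- ===== LEMMAS AND PROOFS =====

-- unzip4 of a tuple-valued map is the four component maps
theorem unzip4_map {α : Type} (l : List α) (a b c d : α → String) :
    unzip4 (l.map (fun j => (a j, b j, c j, d j))) = (l.map a, l.map b, l.map c, l.map d) := by
  induction l with
  | nil => rfl
  | cons x xs ih => simp [unzip4, ih]

-- A's inner loop over range(2, 2+depth) builds the column as a map
theorem colA_eq_map (lines : List String) (depth k : Int) :
    (PySem.List.pyRange 2 (2 + depth) 1).foldl
      (fun col j => col ++ [lineChar lines j k]) []
      = (PySem.List.pyRange 2 (2 + depth) 1).map (fun j => lineChar lines j k) := by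
  simpa using PySem.List.foldl_append_singleton_eq_map (fun j => lineChar lines j k) (PySem.List.pyRange 2 (2 + depth) 1) []

-- ===== VERDICT (by name: the statement is the Claim_ definition above) =====
theorem parse_spec : Claim_equal_parse := by
  intro lines _ _
  unfold Spec_parse parse parse_alt
  by_cases h : (lines.length : Int) - 2 ≤ 0
  · have hnil : PySem.List.pyRange 2 (2 + ((lines.length : Int) - 2)) 1 = [] :=
      PySem.List.pyRange_one_eq_nil (by omega)
    have h4 : PySem.List.pyRange 0 4 1 = [0, 1, 2, 3] := by decide
    simp only [if_pos h, h4, List.foldl, hnil, List.foldl_nil]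
    rfl
  · simp only [if_neg h]
    have h4 : PySem.List.pyRange 0 4 1 = [0, 1, 2, 3] := by decide
    simp only [h4, List.foldl, colA_eq_map, unzip4_map]
    norm_num
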